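-- pv_equiv track=rewrite | github.com/inmonim/algorithm | 프로그래머스/unrated/133499. 옹알이 （2）/옹알이 （2）.py | solution
-- ===== SOURCE A (Python) =====
-- def solution(babbling):
--     cnt = 0
--     for i in babbling:
--         idx = 0
--         P = 5
--         while idx < len(i):
--             if P != 0 and i[idx:idx+2] == "ye":
--                 idx += 2
--                 P = 0
--             elif P != 1 and i[idx:idx+2] == "ma":
--                 idx += 2
--                 P = 1
--             elif P != 2 and i[idx:idx+3] == "woo":
--                 idx += 3
--                 P = 2
--             elif P != 3 and i[idx:idx+3] == "aya":
--                 idx += 3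
--                 P = 3
--             else:
--                 break
--
--             if idx == len(i):
--                 cnt += 1
--     return cnt
-- ===== SOURCE B (Python) =====
-- TOKENS = ("aya", "ye", "woo", "ma")
--
--
-- def tokenize(s):
--     """Greedy left-to-right tokenization; unique since tokens start with distinct chars."""
--     toks = []
--     while s:
--         for t in TOKENS:
--             if s.startswith(t):
--                 toks.append(t)
--                 s = s[len(t):]
--                 break
--         else:
--             return None
--     return toks
--
--
-- def solution(babbling):
--     cnt = 0
--     for word in babbling:
--         toks = tokenize(word)
--         if toks is not None and toks and all(a != b for a, b in zip(toks, toks[1:])):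
--             cnt += 1
--     return cnt
-- ===== Notes on version B (the rewrite author's own statement) =====
-- stated objective: simpler
-- what changed: B separates the two concerns A fuses in one stateful scan: phase 1 greedily tokenizes each word into tokens from {aya,ye,woo,ma} (unique since start chars are distinct), phase 2 counts the word iff tokenization succeeded, is non-empty, and has no two adjacent equal tokens.
import Mathlib
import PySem

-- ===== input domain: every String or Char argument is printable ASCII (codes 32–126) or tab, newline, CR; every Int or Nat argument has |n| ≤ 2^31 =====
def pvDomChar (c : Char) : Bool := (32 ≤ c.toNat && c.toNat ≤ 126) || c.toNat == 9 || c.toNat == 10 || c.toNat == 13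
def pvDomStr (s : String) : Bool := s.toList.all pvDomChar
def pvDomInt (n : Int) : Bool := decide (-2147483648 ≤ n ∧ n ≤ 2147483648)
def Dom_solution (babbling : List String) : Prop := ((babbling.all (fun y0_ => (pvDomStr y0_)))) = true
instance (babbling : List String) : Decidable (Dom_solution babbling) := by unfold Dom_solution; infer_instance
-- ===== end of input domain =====

-- B replaces A's fused stateful scan by: greedy tokenization, then a separate non-empty +
-- no-adjacent-repeat check (same cost; objective: simpler separation of concerns).
-- ===== PORT A =====
-- the while loop over idx/P, expressed on the remaining suffix (i[idx:idx+k] = take k of the suffix);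
-- returns true iff the loop reaches 'idx == len(i)' and increments cnt
def solLoop (cs : List Char) (P : Int) : Bool :=
  if cs = [] then false          -- while-condition idx < len fails
  else if P ≠ 0 ∧ cs.take 2 = ['y', 'e'] then
    (if cs.drop 2 = [] then true else solLoop (cs.drop 2) 0)
  else if P ≠ 1 ∧ cs.take 2 = ['m', 'a'] then
    (if cs.drop 2 = [] then true else solLoop (cs.drop 2) 1)
  else if P ≠ 2 ∧ cs.take 3 = ['w', 'o', 'o'] then
    (if cs.drop 3 = [] then true else solLoop (cs.drop 3) 2)
  else if P ≠ 3 ∧ cs.take 3 = ['a', 'y', 'a'] then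
    (if cs.drop 3 = [] then true else solLoop (cs.drop 3) 3)
  else false                     -- break
termination_by cs.length
decreasing_by
  all_goals simp_all [List.length_drop]
  all_goals (cases ‹List Char› with | nil => simp_all | cons a t => simp)

def solution (babbling : List String) : Int :=
  babbling.foldl (fun cnt i => if solLoop i.toList 5 then cnt + 1 else cnt) 0

-- ===== PORT B =====
-- greedy tokenizer: for t in ("aya","ye","woo","ma"): if s.startswith(t) … ; None on failure
def tokenize (cs : List Char) : Option (List String) :=
  if cs = [] then some []
  else if cs.take 3 = ['a', 'y', 'a'] then (tokenize (cs.drop 3)).map ("aya" :: ·)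
  else if cs.take 2 = ['y', 'e'] then (tokenize (cs.drop 2)).map ("ye" :: ·)
  else if cs.take 3 = ['w', 'o', 'o'] then (tokenize (cs.drop 3)).map ("woo" :: ·)
  else if cs.take 2 = ['m', 'a'] then (tokenize (cs.drop 2)).map ("ma" :: ·)
  else none
termination_by cs.length
decreasing_by
  all_goals simp_all [List.length_drop]
  all_goals (cases ‹List Char› with | nil => simp_all | cons a t => simp)

-- all(a != b for a, b in zip(toks, toks[1:]))
def pairsOK (ts : List String) : Bool := (ts.zip ts.tail).all (fun p => p.1 ≠ p.2)

def solution_alt (babbling : List String) : Int :=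
  babbling.foldl (fun cnt s =>
    match tokenize s.toList with
    | some ts => if ts ≠ [] ∧ pairsOK ts then cnt + 1 else cnt
    | none => cnt) 0

-- ===== PRECONDITION & SPEC =====
def Spec_solution (babbling : List String) (out : Int) : Prop := out = solution_alt babbling
instance (babbling : List String) (out : Int) : Decidable (Spec_solution babbling out) := by unfold Spec_solution; infer_instance

-- ===== CLAIM (what is proved, stated in full; the proofs are below) =====
def Claim_equal_solution : Prop := ∀ (babbling : List String), Dom_solution babbling → Spec_solution babbling (solution babbling)

-- ===== LEMMAS AND PROOFS =====
-- A's P-code of each token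
def codeOf (t : String) : Int :=
  if t = "ye" then 0 else if t = "ma" then 1 else if t = "woo" then 2 else 3

-- the no-repeat condition as A tracks it: previous code P, first token ≠ P, adjacents differ
def chainFrom (P : Int) : List String → Bool
  | [] => true
  | t :: ts => (codeOf t ≠ P : Bool) && chainFrom (codeOf t) ts

theorem tokenize_nil : tokenize [] = some [] := by rw [tokenize]; rfl

theorem take2_shape (cs : List Char) (a b : Char) (h : cs.take 2 = [a, b]) :
    cs = a :: b :: cs.drop 2 := by
  match cs with
  | [] => simp at h
  | [x] => simp at h
  | x :: y :: t => simp_all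

theorem take3_shape (cs : List Char) (a b c : Char) (h : cs.take 3 = [a, b, c]) :
    cs = a :: b :: c :: cs.drop 3 := by
  match cs with
  | [] => simp at h
  | [x] => simp at h
  | [x, y] => simp at h
  | x :: y :: z :: t => simp_all

theorem solLoop_eq_tokenize (cs : List Char) (P : Int) :
    solLoop cs P =
      (match tokenize cs with
       | none => false
       | some ts => !cs.isEmpty && chainFrom P ts) := by
  fun_induction solLoop cs P with
  | case1 P => rw [tokenize]; simp
  | case2 cs P h0 h1 hd =>
      obtain ⟨rest, rfl⟩ : ∃ rest, cs = 'y' :: 'e' :: rest :=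
        ⟨cs.drop 2, take2_shape _ _ _ h1.2⟩
      simp only [List.drop] at hd; subst hd
      rw [tokenize]
      simp [tokenize_nil, chainFrom, codeOf, Ne.symm h1.1]
  | case3 cs P h0 h1 hd ih =>
      obtain ⟨rest, rfl⟩ : ∃ rest, cs = 'y' :: 'e' :: rest :=
        ⟨cs.drop 2, take2_shape _ _ _ h1.2⟩
      simp only [List.drop] at hd ih ⊢
      rw [tokenize]
      cases htk : tokenize rest with
      | none => simp [htk] at ih; simp [ih, htk]
      | some ts =>
          simp [htk] at ih
          simp [ih, htk, chainFrom, codeOf, Ne.symm h1.1, hd]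
  | case4 cs P h0 h1 h2 hd =>
      obtain ⟨rest, rfl⟩ : ∃ rest, cs = 'm' :: 'a' :: rest :=
        ⟨cs.drop 2, take2_shape _ _ _ h2.2⟩
      simp only [List.drop] at hd; subst hd
      rw [tokenize]
      simp [tokenize_nil, chainFrom, codeOf, Ne.symm h2.1]
  | case5 cs P h0 h1 h2 hd ih =>
      obtain ⟨rest, rfl⟩ : ∃ rest, cs = 'm' :: 'a' :: rest :=
        ⟨cs.drop 2, take2_shape _ _ _ h2.2⟩
      simp only [List.drop] at hd ih ⊢
      rw [tokenize]
      cases htk : tokenize rest with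
      | none => simp [htk] at ih; simp [ih, htk]
      | some ts =>
          simp [htk] at ih
          simp [ih, htk, chainFrom, codeOf, Ne.symm h2.1, hd]
  | case6 cs P h0 h1 h2 h3 hd =>
      obtain ⟨rest, rfl⟩ : ∃ rest, cs = 'w' :: 'o' :: 'o' :: rest :=
        ⟨cs.drop 3, take3_shape _ _ _ _ h3.2⟩
      simp only [List.drop] at hd; subst hd
      rw [tokenize]
      simp [tokenize_nil, chainFrom, codeOf, Ne.symm h3.1]
  | case7 cs P h0 h1 h2 h3 hd ih =>
      obtain ⟨rest, rfl⟩ : ∃ rest, cs = 'w' :: 'o' :: 'o' :: rest :=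
        ⟨cs.drop 3, take3_shape _ _ _ _ h3.2⟩
      simp only [List.drop] at hd ih ⊢
      rw [tokenize]
      cases htk : tokenize rest with
      | none => simp [htk] at ih; simp [ih, htk]
      | some ts =>
          simp [htk] at ih
          simp [ih, htk, chainFrom, codeOf, Ne.symm h3.1, hd]
  | case8 cs P h0 h1 h2 h3 h4 hd =>
      obtain ⟨rest, rfl⟩ : ∃ rest, cs = 'a' :: 'y' :: 'a' :: rest :=
        ⟨cs.drop 3, take3_shape _ _ _ _ h4.2⟩
      simp only [List.drop] at hd; subst hd
      rw [tokenize]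
      simp [tokenize_nil, chainFrom, codeOf, Ne.symm h4.1]
  | case9 cs P h0 h1 h2 h3 h4 hd ih =>
      obtain ⟨rest, rfl⟩ : ∃ rest, cs = 'a' :: 'y' :: 'a' :: rest :=
        ⟨cs.drop 3, take3_shape _ _ _ _ h4.2⟩
      simp only [List.drop] at hd ih ⊢
      rw [tokenize]
      cases htk : tokenize rest with
      | none => simp [htk] at ih; simp [ih, htk]
      | some ts =>
          simp [htk] at ih
          simp [ih, htk, chainFrom, codeOf, Ne.symm h4.1, hd]
  | case10 cs P h0 h1 h2 h3 h4 =>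
      rw [tokenize, if_neg h0]
      split_ifs with ga gy gw gm
      · have hP : P = 3 := by by_contra hne; exact h4 ⟨hne, ga⟩
        cases htk : tokenize (cs.drop 3) <;> simp [chainFrom, codeOf, hP]
      · have hP : P = 0 := by by_contra hne; exact h1 ⟨hne, gy⟩
        cases htk : tokenize (cs.drop 2) <;> simp [chainFrom, codeOf, hP]
      · have hP : P = 2 := by by_contra hne; exact h3 ⟨hne, gw⟩
        cases htk : tokenize (cs.drop 3) <;> simp [chainFrom, codeOf, hP]
      · have hP : P = 1 := by by_contra hne; exact h2 ⟨hne, gm⟩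
        cases htk : tokenize (cs.drop 2) <;> simp [chainFrom, codeOf, hP]
      · simp

theorem tokenize_mem (cs : List Char) :
    ∀ ts, tokenize cs = some ts →
      ∀ t ∈ ts, t = "aya" ∨ t = "ye" ∨ t = "woo" ∨ t = "ma" := by
  fun_induction tokenize cs with
  | case1 => intro ts h' t ht; simp_all
  | case2 cs h0 h1 ih =>
      intro ts h' t ht
      obtain ⟨us, htk, rfl⟩ := Option.map_eq_some_iff.mp h'
      rcases List.mem_cons.mp ht with rfl | h
      · simp
      · exact ih us htk t h
  | case3 cs h0 h1 h2 ih =>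
      intro ts h' t ht
      obtain ⟨us, htk, rfl⟩ := Option.map_eq_some_iff.mp h'
      rcases List.mem_cons.mp ht with rfl | h
      · simp
      · exact ih us htk t h
  | case4 cs h0 h1 h2 h3 ih =>
      intro ts h' t ht
      obtain ⟨us, htk, rfl⟩ := Option.map_eq_some_iff.mp h'
      rcases List.mem_cons.mp ht with rfl | h
      · simp
      · exact ih us htk t h
  | case5 cs h0 h1 h2 h3 h4 ih =>
      intro ts h' t ht
      obtain ⟨us, htk, rfl⟩ := Option.map_eq_some_iff.mp h'
      rcases List.mem_cons.mp ht with rfl | h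
      · simp
      · exact ih us htk t h
  | case6 cs h0 h1 h2 h3 h4 => intro ts h'; simp at h'

theorem tokenize_nil_iff (cs : List Char) (ts : List String) (h : tokenize cs = some ts) :
    cs = [] ↔ ts = [] := by
  rw [tokenize] at h
  split_ifs at h with g0 g1 g2 g3 g4
  · simp at h; simp [g0, ← h]
  · obtain ⟨us, _, rfl⟩ := Option.map_eq_some_iff.mp h; simp [g0]
  · obtain ⟨us, _, rfl⟩ := Option.map_eq_some_iff.mp h; simp [g0]
  · obtain ⟨us, _, rfl⟩ := Option.map_eq_some_iff.mp h; simp [g0]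
  · obtain ⟨us, _, rfl⟩ := Option.map_eq_some_iff.mp h; simp [g0]

theorem chainFrom_eq_pairsOK (ts : List String)
    (hm : ∀ t ∈ ts, t = "aya" ∨ t = "ye" ∨ t = "woo" ∨ t = "ma") : ∀ (t : String),
    (t = "aya" ∨ t = "ye" ∨ t = "woo" ∨ t = "ma") →
    chainFrom (codeOf t) ts = pairsOK (t :: ts) := by
  induction ts with
  | nil => intro t ht; simp [chainFrom, pairsOK]
  | cons u us ih =>
      intro t ht
      have hu : u = "aya" ∨ u = "ye" ∨ u = "woo" ∨ u = "ma" := hm u (by simp)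
      have hus : ∀ s ∈ us, s = "aya" ∨ s = "ye" ∨ s = "woo" ∨ s = "ma" :=
        fun s hs => hm s (by simp [hs])
      have hcode : (decide (codeOf u ≠ codeOf t)) = decide (¬ t = u) := by
        rcases ht with rfl | rfl | rfl | rfl <;> rcases hu with rfl | rfl | rfl | rfl <;> decide
      simp only [chainFrom, hcode, ih hus u hu]
      simp [pairsOK]

theorem per_string (s : String) :
    solLoop s.toList 5 =
      (match tokenize s.toList with
       | none => false
       | some ts => decide (ts ≠ []) && pairsOK ts) := by
  rw [solLoop_eq_tokenize]
  cases htk : tokenize s.toList with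
  | none => simp
  | some ts =>
      cases ts with
      | nil =>
          have : s.toList = [] := (tokenize_nil_iff _ _ htk).2 rfl
          simp [this]
      | cons t us =>
          have hne : s.toList ≠ [] := fun h => by
            have := (tokenize_nil_iff _ _ htk).1 h; simp at this
          have hm := tokenize_mem s.toList (t :: us) htk
          have ht := hm t (by simp)
          have h5 : (decide (codeOf t ≠ (5 : Int))) = true := by
            rcases ht with rfl | rfl | rfl | rfl <;> decide
          have hchain : chainFrom (5 : Int) (t :: us) = pairsOK (t :: us) := by
            simp only [chainFrom, h5, Bool.true_and]
            exact chainFrom_eq_pairsOK us (fun x hx => hm x (by simp [hx])) t ht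
          simp [hne, hchain]

theorem fold_eq (l : List String) : ∀ (acc : Int),
    l.foldl (fun cnt i => if solLoop i.toList 5 then cnt + 1 else cnt) acc =
    l.foldl (fun cnt s =>
      match tokenize s.toList with
      | some ts => if ts ≠ [] ∧ pairsOK ts then cnt + 1 else cnt
      | none => cnt) acc := by
  induction l with
  | nil => intro acc; rfl
  | cons s l ih =>
      intro acc
      simp only [List.foldl_cons, per_string s]
      rw [ih]
      cases htk : tokenize s.toList with
      | none => simp
      | some ts => simp [Bool.and_eq_true]

-- ===== VERDICT (by name: the statement is the Claim_ definition above) =====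
theorem solution_spec : Claim_equal_solution := by
  intro babbling _
  show solution babbling = solution_alt babbling
  exact fold_eq babbling 0
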